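-- pv_equiv track=rewrite | github.com/platypus46/algorithm | python/programmers/과일장수.py | solution
-- ===== SOURCE A (Python) =====
-- def solution(k, m, score):
--     score=list(reversed(sorted(score)))
--
--     #박스 전체가 담긴 리스트
--     box_ls=[]
--     #한 박스에 들어가는 원소
--     ls=[]
--
--     ans=0
--
--     for i in range(len(score)):
--         ls.append(score[i])
--         if ((i+1)%m)==0:
--             box_ls.append(ls)
--             ls=[]
--
--     for i in box_ls:
--         ans+=min(i)*m
--
--     return ans
-- ===== SOURCE B (Python) =====
-- def solution(k, m, score):
--     s = sorted(score, reverse=True)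
--     return sum(s[i] * m for i in range(m - 1, len(s), m))
-- ===== Notes on version B (the rewrite author's own statement) =====
-- stated objective: simpler
-- what changed: Instead of building each box as a list and summing min(box)*m over a list of boxes, B sorts descending once and sums score[i]*m directly at the stride positions i = m-1, 2m-1, ..., since each complete box's minimum is its last sorted element.
-- outside the precondition, e.g. on solution(0, 0, []): A returns 0, B raises ValueError; on solution(0, -2, [5, 3, 1]): A returns -6, B returns 0
import Mathlib
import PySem

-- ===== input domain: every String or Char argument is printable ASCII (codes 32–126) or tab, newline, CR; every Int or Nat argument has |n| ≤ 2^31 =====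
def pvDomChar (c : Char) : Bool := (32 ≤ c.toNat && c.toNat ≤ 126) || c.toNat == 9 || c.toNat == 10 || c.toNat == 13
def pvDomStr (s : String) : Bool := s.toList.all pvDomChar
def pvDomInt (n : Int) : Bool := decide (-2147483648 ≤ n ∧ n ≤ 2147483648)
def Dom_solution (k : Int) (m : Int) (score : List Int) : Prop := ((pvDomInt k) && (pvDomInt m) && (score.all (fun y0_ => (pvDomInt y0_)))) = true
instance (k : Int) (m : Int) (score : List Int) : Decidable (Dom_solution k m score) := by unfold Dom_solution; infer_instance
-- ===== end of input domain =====

-- B replaces A's box-building (list of boxes, min() per box) by a direct strided sum over the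
-- descending-sorted scores: a simpler decomposition with the same sorting cost.


-- ===== PORT A =====
def solution (k : Int) (m : Int) (score : List Int) : Int :=
  let s := (PySem.List.sorted score (fun x => x)).reverse
  let st := (PySem.List.pyRange 0 (s.length : Int) 1).foldl
    (fun (st : List (List Int) × List Int) i =>
      let ls := st.2 ++ [PySem.List.pyGetD s i 0]
      if PySem.Int.mod (i + 1) m = 0 then (st.1 ++ [ls], ([] : List Int)) else (st.1, ls))
    ([], [])
  st.1.foldl (fun ans b => ans + (PySem.List.min? b (fun x => x)).getD 0 * m) 0

-- ===== PORT B =====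
def solution_alt (k : Int) (m : Int) (score : List Int) : Int :=
  let s := PySem.List.sorted score (fun x => x) true
  ((PySem.List.pyRange (m - 1) (s.length : Int) m).map (fun i => PySem.List.pyGetD s i 0 * m)).sum

-- ===== PRECONDITION & SPEC =====
-- Pre_ restricts to positive box size m ≥ 1 (the task's natural domain): A raises
-- ZeroDivisionError for m = 0 on nonempty score (and on empty score returns 0 where B raises
-- ValueError), and for m < 0 A's box-splitting by (i+1) % m is meaningless (B returns 0 there).
def Pre_solution (k : Int) (m : Int) (score : List Int) : Prop := 1 ≤ m
instance (k : Int) (m : Int) (score : List Int) : Decidable (Pre_solution k m score) := by unfold Pre_solution; infer_instance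
def pvWitness_solution : Int × Int × List Int := (0, 2, [3, 1, 2, 4])
def Spec_solution (k : Int) (m : Int) (score : List Int) (out : Int) : Prop := out = solution_alt k m score
instance (k : Int) (m : Int) (score : List Int) (out : Int) : Decidable (Spec_solution k m score out) := by unfold Spec_solution; infer_instance

-- ===== CLAIM (what is proved, stated in full; the proofs are below) =====
def Claim_equal_solution : Prop := ∀ (k : Int) (m : Int) (score : List Int), Dom_solution k m score → Pre_solution k m score → Spec_solution k m score (solution k m score)

-- ===== LEMMAS AND PROOFS =====

-- A's loop body and A's summation fold, named for the proofs
def pvStep (s : List Int) (m : Int) : (List (List Int) × List Int) → Int → (List (List Int) × List Int) :=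
  fun st i =>
    let ls := st.2 ++ [PySem.List.pyGetD s i 0]
    if PySem.Int.mod (i + 1) m = 0 then (st.1 ++ [ls], ([] : List Int)) else (st.1, ls)

def pvSumF (m : Int) : Int → List Int → Int :=
  fun ans b => ans + (PySem.List.min? b (fun x => x)).getD 0 * m

theorem pv_solution_eq (k m : Int) (score : List Int) :
    solution k m score =
      (((PySem.List.pyRange 0 (((PySem.List.sorted score (fun x => x)).reverse).length : Int) 1).foldl
          (pvStep ((PySem.List.sorted score (fun x => x)).reverse) m) ([], [])).1.foldl (pvSumF m) 0) := rfl

-- reversed(sorted(xs)) = sorted(xs, reverse=True) for integer lists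
theorem pv_rev_sorted (xs : List Int) :
    (PySem.List.sorted xs (fun x => x)).reverse = PySem.List.sorted xs (fun x => x) true := by
  apply List.Perm.eq_of_pairwise
  · exact fun a b _ _ h1 h2 => le_antisymm h2 h1
  · rw [List.pairwise_reverse]
    exact PySem.List.sorted_pairwise xs (fun x => x)
  · exact PySem.List.sorted_pairwise_rev xs (fun x => x)
  · exact ((PySem.List.sorted xs (fun x => x)).reverse_perm.trans
      (PySem.List.sorted_perm xs (fun x => x) false)).trans
      (PySem.List.sorted_perm xs (fun x => x) true).symm

-- cons form of range with a positive step
theorem pv_pyRange_cons_pos (a b s : Int) (hs : 0 < s) (hab : a < b) :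
    PySem.List.pyRange a b s = a :: PySem.List.pyRange (a + s) b s := by
  rw [PySem.List.pyRange_of_pos _ _ hs, PySem.List.pyRange_of_pos _ _ hs]
  have key : (if a < b then ((b - a + s - 1) / s).toNat else 0) =
      (if a + s < b then ((b - (a + s) + s - 1) / s).toNat else 0) + 1 := by
    by_cases h2 : a + s < b
    · simp only [if_pos hab, if_pos h2]
      have hdiv : (b - a + s - 1) / s = (b - a - 1) / s + 1 := by
        rw [show b - a + s - 1 = (b - a - 1) + 1 * s by ring,
          Int.add_mul_ediv_right _ _ (ne_of_gt hs)]
      have h0 : (0:Int) ≤ (b - a - 1) / s := Int.ediv_nonneg (by omega) (le_of_lt hs)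
      rw [show b - (a + s) + s - 1 = b - a - 1 by ring, hdiv]
      omega
    · simp only [if_pos hab, if_neg h2]
      have h1 : (1:Int) ≤ (b - a + s - 1) / s := by
        rw [Int.le_ediv_iff_mul_le hs]; omega
      have h2' : (b - a + s - 1) / s < 2 := by
        rw [Int.ediv_lt_iff_lt_mul hs]; omega
      omega
  rw [key, List.range_succ_eq_map]
  simp only [List.map_cons, List.map_map, Nat.cast_zero, mul_zero, add_zero]
  congr 1
  apply List.map_congr_left
  intro k _
  simp only [Function.comp, Nat.succ_eq_add_one]
  push_cast
  ring

-- nil form of range with a positive step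
theorem pv_pyRange_nil_pos (a b s : Int) (hs : 0 < s) (hab : b ≤ a) :
    PySem.List.pyRange a b s = [] := by
  rw [PySem.List.pyRange_of_pos _ _ hs]
  simp [show ¬ a < b by omega]

-- min of a nonempty descending list is its last element
theorem pv_min_desc (l : List Int) (hne : l ≠ []) (hd : l.Pairwise (fun a b => b ≤ a)) :
    (PySem.List.min? l (fun x => x)).getD 0 = l.getLast?.getD 0 := by
  rw [List.getLast?_eq_some_getLast hne, Option.getD_some]
  obtain ⟨x, hx⟩ : ∃ x, PySem.List.min? l (fun x => x) = some x := by
    cases h : PySem.List.min? l (fun x => x) with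
    | none => exact absurd ((PySem.List.min?_eq_none_iff l _).mp h) hne
    | some x => exact ⟨x, rfl⟩
  rw [hx]
  have hxmem := PySem.List.min?_mem hx
  have hxmin := PySem.List.min?_isMin hx
  have hlast : ∀ y ∈ l, l.getLast hne ≤ y := by
    intro y hy
    obtain ⟨i, hi, hiy⟩ := List.getElem_of_mem hy
    rw [List.getLast_eq_getElem hne]
    rcases Nat.lt_or_ge i (l.length - 1) with h | h
    · have := List.pairwise_iff_getElem.mp hd i (l.length - 1) hi (by omega) h
      omega
    · have : i = l.length - 1 := by omega
      subst this
      omega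
  simp only [Option.getD_some]
  exact le_antisymm (hxmin _ (List.getLast_mem hne)) (hlast x hxmem)

-- a tick-free segment of A's loop just appends the fetched elements to ls
theorem pv_noTick (s : List Int) (m b : Int) :
    ∀ (n : Nat) (a : Int) (B : List (List Int)) (ls : List Int), (b - a).toNat = n →
      (∀ i, a ≤ i → i < b → ¬ (m ∣ (i + 1))) →
      (PySem.List.pyRange a b 1).foldl (pvStep s m) (B, ls) =
        (B, ls ++ (PySem.List.pyRange a b 1).map (fun i => PySem.List.pyGetD s i 0)) := by
  intro n
  induction n with
  | zero =>
    intro a B ls hn h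
    rw [PySem.List.pyRange_one_eq_nil (by omega)]
    simp
  | succ n IH =>
    intro a B ls hn h
    have hab : a < b := by omega
    rw [PySem.List.pyRange_one_cons hab]
    simp only [List.foldl_cons, List.map_cons]
    have hstep : pvStep s m (B, ls) a = (B, ls ++ [PySem.List.pyGetD s a 0]) := by
      unfold pvStep
      simp only
      rw [if_neg]
      intro hdvd
      exact h a le_rfl hab ((PySem.Int.mod_eq_zero_iff_dvd _ _).mp hdvd)
    rw [hstep, IH (a + 1) B _ (by omega) (fun i hi1 hi2 => h i (by omega) hi2)]
    simp

-- main invariant: from a box boundary a, A's remaining loop + summation equals the strided sum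
theorem pv_main (s : List Int) (m : Int) (hm : 1 ≤ m) (hs : s.Pairwise (fun a b => b ≤ a)) :
    ∀ (n : Nat) (a : Int) (B : List (List Int)), ((s.length : Int) - a).toNat = n → 0 ≤ a → m ∣ a →
      ((PySem.List.pyRange a (s.length : Int) 1).foldl (pvStep s m) (B, [])).1.foldl (pvSumF m) 0 =
        B.foldl (pvSumF m) 0 +
          ((PySem.List.pyRange (a + m - 1) (s.length : Int) m).map
            (fun i => PySem.List.pyGetD s i 0 * m)).sum := by
  intro n
  induction n using Nat.strong_induction_on with
  | _ n IH =>
  intro a B hn ha hdvd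
  by_cases hfit : a + m ≤ (s.length : Int)
  · have hsplit := PySem.List.pyRange_one_append a (a + m) (s.length : Int) (by omega) hfit
    have hblock : PySem.List.pyRange a (a + m) 1 = PySem.List.pyRange a (a + m - 1) 1 ++ [a + m - 1] := by
      rw [PySem.List.pyRange_one_append a (a + m - 1) (a + m) (by omega) (by omega)]
      congr 1
      have h := PySem.List.pyRange_one_singleton (a + m - 1)
      rw [show a + m - 1 + 1 = a + m by ring] at h
      exact h
    have hfree : ∀ i, a ≤ i → i < a + m - 1 → ¬ (m ∣ (i + 1)) := by
      intro i h1 h2 hdv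
      have hd2 : m ∣ (i + 1 - a) := hdv.sub hdvd
      have := Int.le_of_dvd (by omega) hd2
      omega
    have h1 := pv_noTick s m (a + m - 1) ((a + m - 1) - a).toNat a B [] rfl hfree
    rw [hsplit, List.foldl_append, hblock, List.foldl_append, h1]
    simp only [List.foldl_cons, List.foldl_nil, List.nil_append]
    have htick : pvStep s m (B, (PySem.List.pyRange a (a + m - 1) 1).map (fun i => PySem.List.pyGetD s i 0)) (a + m - 1) =
        (B ++ [((PySem.List.pyRange a (a + m) 1).map (fun i => PySem.List.pyGetD s i 0))], []) := by
      unfold pvStep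
      simp only
      rw [if_pos, hblock]
      · simp
      · rw [show a + m - 1 + 1 = a + m by ring]
        exact (PySem.Int.mod_eq_zero_iff_dvd _ _).mpr (by exact (Dvd.dvd.add hdvd ⟨1, by ring⟩))
    rw [htick, IH ((s.length : Int) - (a + m)).toNat (by omega) (a + m) _ rfl (by omega) (by exact Dvd.dvd.add hdvd ⟨1, by ring⟩)]
    have hchunkne : ((PySem.List.pyRange a (a + m) 1).map (fun i => PySem.List.pyGetD s i 0)) ≠ [] := by
      rw [hblock]; simp
    have hchunkpw : ((PySem.List.pyRange a (a + m) 1).map (fun i => PySem.List.pyGetD s i 0)).Pairwise (fun x y => y ≤ x) := by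
      rw [List.pairwise_map]
      have hg : ∀ p q : Int, 0 ≤ p → p < q → q < (s.length : Int) →
          PySem.List.pyGetD s q 0 ≤ PySem.List.pyGetD s p 0 := by
        intro p q hp hpq hq
        rw [PySem.List.pyGetD_eq_getElem s (i := p) 0 (by omega) (by omega),
            PySem.List.pyGetD_eq_getElem s (i := q) 0 (by omega) (by omega)]
        exact List.pairwise_iff_getElem.mp hs p.toNat q.toNat (by omega) (by omega) (by omega)
      apply List.Pairwise.imp_of_mem _ (PySem.List.pairwise_lt_pyRange_one a (a + m))
      intro i j hi hj hij
      rw [PySem.List.mem_pyRange_one] at hi hj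
      exact hg i j (by omega) hij (by omega)
    have hmin : (PySem.List.min? ((PySem.List.pyRange a (a + m) 1).map (fun i => PySem.List.pyGetD s i 0)) (fun x => x)).getD 0 =
        PySem.List.pyGetD s (a + m - 1) 0 := by
      rw [pv_min_desc _ hchunkne hchunkpw, hblock, List.map_append]
      simp
    rw [List.foldl_append]
    simp only [List.foldl_cons, List.foldl_nil]
    rw [pv_pyRange_cons_pos (a + m - 1) (s.length : Int) m (by omega) (by omega)]
    simp only [List.map_cons, List.sum_cons]
    unfold pvSumF
    rw [hmin]
    rw [show a + m - 1 + m = a + m + m - 1 by ring]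
    ring
  · have hfree : ∀ i, a ≤ i → i < (s.length : Int) → ¬ (m ∣ (i + 1)) := by
      intro i h1 h2 hdv
      have hd2 : m ∣ (i + 1 - a) := hdv.sub hdvd
      have := Int.le_of_dvd (by omega) hd2
      omega
    rw [pv_noTick s m (s.length : Int) n a B [] hn hfree]
    rw [pv_pyRange_nil_pos (a + m - 1) (s.length : Int) m (by omega) (by omega)]
    simp

-- ===== VERDICT (by name: the statement is the Claim_ definition above) =====
theorem solution_spec : Claim_equal_solution := by
  intro k m score _ hm
  unfold Spec_solution
  rw [pv_solution_eq, pv_rev_sorted]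
  have hs := PySem.List.sorted_pairwise_rev score (fun x => x)
  have := pv_main (PySem.List.sorted score (fun x => x) true) m hm hs
    (((PySem.List.sorted score (fun x => x) true).length : Int) - 0).toNat 0 [] rfl le_rfl ⟨0, by ring⟩
  rw [this]
  unfold solution_alt
  simp
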